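-- pv_equiv track=rewrite | github.com/SatyamGaba/agentic_uav | agentic_uav/experiments.py | count_record_changes
-- ===== SOURCE A (Python) =====
-- from typing import Any, Iterable
--
-- def count_record_changes(records: list[dict[str, Any]], key: str) -> int:
--     changes = 0
--     previous: dict[str, Any] = {}
--     for record in records:
--         current = record.get(key, {})
--         for uav_id, value in current.items():
--             if uav_id in previous and previous[uav_id] != value:
--                 changes += 1
--         previous = dict(current)
--     return changes
-- ===== SOURCE B (Python) =====
-- def count_record_changes(records: list[dict[str, "Any"]], key: str) -> int:
--     # Inverted index: build a per-uav timeline of (record_index, value) pairs,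
--     # then count value changes at consecutive record indices within each timeline.
--     timelines = {}
--     for i, record in enumerate(records):
--         for uav_id, value in record.get(key, {}).items():
--             timelines[uav_id] = timelines.get(uav_id, []) + [(i, value)]
--     changes = 0
--     for tl in timelines.values():
--         for (i, v), (j, w) in zip(tl, tl[1:]):
--             if j == i + 1 and v != w:
--                 changes += 1
--     return changes
-- ===== Notes on version B (the rewrite author's own statement) =====
-- stated objective: alternative
-- what changed: Replaces A's single record-by-record pass carrying a 'previous' dict by a two-stage inverted index: first group every observation into a per-uav_id timeline of (record_index, value) pairs, then count value changes at consecutive record indices within each timeline.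
import Mathlib
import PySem

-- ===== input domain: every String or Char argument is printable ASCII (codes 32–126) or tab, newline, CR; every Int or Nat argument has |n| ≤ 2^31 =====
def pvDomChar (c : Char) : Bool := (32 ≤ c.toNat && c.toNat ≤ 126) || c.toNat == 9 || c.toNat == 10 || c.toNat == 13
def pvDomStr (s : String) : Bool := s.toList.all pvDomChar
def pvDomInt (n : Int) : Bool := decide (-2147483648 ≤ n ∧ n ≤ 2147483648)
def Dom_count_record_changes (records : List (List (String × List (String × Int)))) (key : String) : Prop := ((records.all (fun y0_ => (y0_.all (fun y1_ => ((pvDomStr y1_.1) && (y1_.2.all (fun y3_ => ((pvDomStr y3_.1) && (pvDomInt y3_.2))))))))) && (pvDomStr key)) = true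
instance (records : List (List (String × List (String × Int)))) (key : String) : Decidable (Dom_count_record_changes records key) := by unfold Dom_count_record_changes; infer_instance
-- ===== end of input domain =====

-- B replaces A's stateful record-by-record pass by an inverted index: per-uav timelines of
-- (record_index, value), then counting consecutive-index value changes inside each timeline.

-- ===== PORT A =====
-- one iteration of A's outer loop: state = (changes, previous dict)
def pvStepA (key : String) (st : Int × PySem.Dict String Int) (record : List (String × List (String × Int))) : Int × PySem.Dict String Int :=
  let current := (PySem.Dict.mk record).getD key []
  (current.foldl
    (fun c q =>
      match st.2.get? q.1 with
      | some v => if v ≠ q.2 then c + 1 else c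
      | none => c) st.1,
   PySem.Dict.mk current)

def count_record_changes (records : List (List (String × List (String × Int)))) (key : String) : Int :=
  (records.foldl (pvStepA key) (0, PySem.Dict.empty)).1

-- ===== PORT B =====
-- stage 1: timelines[uav_id] = timelines.get(uav_id, []) + [(i, value)]
-- stage 2: for each timeline, count zip-adjacent pairs at consecutive indices with different values
def count_record_changes_alt (records : List (List (String × List (String × Int)))) (key : String) : Int :=
  let timelines : PySem.Dict String (List (Int × Int)) :=
    (PySem.List.enumerate records 0).foldl
      (fun d p => ((PySem.Dict.mk p.2).getD key []).foldl
          (fun d q => d.modify q.1 [] (fun tl => tl ++ [(p.1, q.2)])) d)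
      PySem.Dict.empty
  timelines.values.foldl
    (fun c tl => (tl.zip (tl.drop 1)).foldl
        (fun c pq => if pq.2.1 = pq.1.1 + 1 ∧ pq.1.2 ≠ pq.2.2 then c + 1 else c) c)
    0

-- ===== PRECONDITION & SPEC =====
-- Pre_ excludes association lists carrying duplicate uav_id keys inside a record's sub-dicts:
-- such lists do not represent Python dicts (whose keys are unique), so the two transliterations
-- may disagree on which duplicate occurrence is compared; no Python-dict input is excluded.
def Pre_count_record_changes (records : List (List (String × List (String × Int)))) (key : String) : Prop :=
  ∀ r ∈ records, ∀ p ∈ r, (p.2.map Prod.fst).Nodup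
instance (records : List (List (String × List (String × Int)))) (key : String) : Decidable (Pre_count_record_changes records key) := by unfold Pre_count_record_changes; infer_instance
def pvWitness_count_record_changes : (List (List (String × List (String × Int)))) × String :=
  ([[("a", [("u", 1)])], [("a", [("u", 2)])]], "a")
def Spec_count_record_changes (records : List (List (String × List (String × Int)))) (key : String) (out : Int) : Prop := out = count_record_changes_alt records key
instance (records : List (List (String × List (String × Int)))) (key : String) (out : Int) : Decidable (Spec_count_record_changes records key out) := by unfold Spec_count_record_changes; infer_instance

-- ===== CLAIM (what is proved, stated in full; the proofs are below) =====
def Claim_equal_count_record_changes : Prop := ∀ (records : List (List (String × List (String × Int)))) (key : String), Dom_count_record_changes records key → Pre_count_record_changes records key → Spec_count_record_changes records key (count_record_changes records key)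

-- ===== LEMMAS AND PROOFS =====

-- the sub-dict of a record at `key`
def pvCur (key : String) (r : List (String × List (String × Int))) : List (String × Int) :=
  (PySem.Dict.mk r).getD key []

-- flattened occurrence list: (uav_id, (record_index, value)) in traversal order
def pvOcc (key : String) : Int → List (List (String × List (String × Int))) → List (String × (Int × Int))
  | _, [] => []
  | i, r :: rest => (pvCur key r).map (fun q => (q.1, (i, q.2))) ++ pvOcc key (i+1) rest

-- per-uav timeline extracted from the occurrence list
def pvTl (key : String) (u : String) (i : Int) (l : List (List (String × List (String × Int)))) : List (Int × Int) :=
  ((pvOcc key i l).filter (fun r => r.1 == u)).map (fun r => r.2)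

-- all uav keys in traversal order (with repetitions)
def pvKeys (key : String) (l : List (List (String × List (String × Int)))) : List String :=
  l.flatMap (fun r => (pvCur key r).map Prod.fst)

-- recursive form of B's zip-scan count
def pvScanR : List (Int × Int) → Int
  | [] => 0
  | [_] => 0
  | a :: b :: rest => (if b.1 = a.1 + 1 ∧ a.2 ≠ b.2 then 1 else 0) + pvScanR (b :: rest)

-- per-uav contribution of one consecutive record pair (prev sub-dict p, current sub-dict c)
def pvG (p c : List (String × Int)) (u : String) : Int :=
  match (PySem.Dict.mk p).get? u, (PySem.Dict.mk c).get? u with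
  | some vp, some v => if vp ≠ v then 1 else 0
  | _, _ => 0

-- A's per-pair count
def pvChg (p c : List (String × Int)) : Int :=
  c.foldl
    (fun acc q =>
      match (PySem.Dict.mk p).get? q.1 with
      | some v => if v ≠ q.2 then acc + 1 else acc
      | none => acc) 0

-- A's recursion: prev sub-dict carried along
def pvASum (key : String) : List (String × Int) → List (List (String × List (String × Int))) → Int
  | _, [] => 0
  | p, r :: rest => pvChg p (pvCur key r) + pvASum key (pvCur key r) rest

theorem pvChg_shift (p c : List (String × Int)) (a : Int) :
    c.foldl
      (fun acc q =>
        match (PySem.Dict.mk p).get? q.1 with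
        | some v => if v ≠ q.2 then acc + 1 else acc
        | none => acc) a = a + pvChg p c := by
  induction c generalizing a with
  | nil => simp [pvChg]
  | cons q rest ih =>
    simp only [pvChg, List.foldl_cons] at ih ⊢
    cases h : (PySem.Dict.mk p).get? q.1 with
    | none =>
      simp only [h]
      rw [ih, ih]
    | some v =>
      simp only [h]
      split
      · rw [ih, ih ((0:Int) + 1)]; ring
      · rw [ih, ih]

theorem pvA_loop (key : String) (l : List (List (String × List (String × Int))))
    (c : Int) (p : List (String × Int)) :
    (l.foldl (pvStepA key) (c, PySem.Dict.mk p)).1 = c + pvASum key p l := by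
  induction l generalizing c p with
  | nil => simp [pvASum]
  | cons r rest ih =>
    simp only [List.foldl_cons, pvStepA, pvASum]
    rw [ih, pvChg_shift]
    simp only [pvCur]
    ring

-- ---- B's dict build flattens to a fold over pvOcc ----
theorem pvBuild_flat (key : String) (l : List (List (String × List (String × Int))))
    (i : Int) (d : PySem.Dict String (List (Int × Int))) :
    (PySem.List.enumerate l i).foldl
      (fun d p => ((PySem.Dict.mk p.2).getD key []).foldl
          (fun d q => d.modify q.1 [] (fun tl => tl ++ [(p.1, q.2)])) d) d
    = (pvOcc key i l).foldl (fun d r => d.modify r.1 [] (fun tl => tl ++ [r.2])) d := by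
  induction l generalizing i d with
  | nil => rfl
  | cons r rest ih =>
    rw [PySem.List.enumerate_cons]
    simp only [List.foldl_cons, pvOcc, List.foldl_append]
    rw [ih, List.foldl_map]
    rfl

theorem pvOcc_map_fst (key : String) (i : Int) (l : List (List (String × List (String × Int)))) :
    (pvOcc key i l).map Prod.fst = pvKeys key l := by
  induction l generalizing i with
  | nil => rfl
  | cons r rest ih =>
    simp only [pvOcc, pvKeys, List.map_append, List.flatMap_cons, List.map_map]
    rw [ih]
    rfl

theorem pvTl_cons (key u : String) (i : Int) (r : List (String × List (String × Int)))
    (rest : List (List (String × List (String × Int)))) :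
    pvTl key u i (r :: rest)
      = ((pvCur key r).filter (fun q => q.1 == u)).map (fun q => (i, q.2)) ++ pvTl key u (i+1) rest := by
  simp only [pvTl, pvOcc, List.filter_append, List.map_append, List.filter_map, List.map_map]
  rfl

theorem pvTl_ge (key u : String) (i : Int) (l : List (List (String × List (String × Int)))) :
    ∀ e ∈ pvTl key u i l, i ≤ e.1 := by
  induction l generalizing i with
  | nil => intro e he; simp [pvTl, pvOcc] at he
  | cons r rest ih =>
    intro e he
    rw [pvTl_cons] at he
    rcases List.mem_append.1 he with h1 | h2
    · rcases List.mem_map.1 h1 with ⟨q, _, rfl⟩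
      simp
    · have := ih (i+1) e h2
      omega

theorem pvTl_nil_of_not_mem (key u : String) (i : Int) (l : List (List (String × List (String × Int))))
    (h : u ∉ pvKeys key l) : pvTl key u i l = [] := by
  unfold pvTl
  rw [List.map_eq_nil_iff, List.filter_eq_nil_iff]
  intro r hr
  have : r.1 ∈ pvKeys key l := by
    rw [← pvOcc_map_fst key i l]
    exact List.mem_map_of_mem hr
  simp only [beq_iff_eq]
  intro hru
  exact h (hru ▸ this)

-- ---- filter of a Nodup association list is the lookup ----
theorem pvFilter_eq (p : List (String × Int)) (u : String) (hp : (p.map Prod.fst).Nodup) :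
    p.filter (fun q => q.1 == u)
      = (match (PySem.Dict.mk p).get? u with
         | some v => [(u, v)]
         | none => []) := by
  induction p with
  | nil => simp [PySem.Dict.get?]
  | cons kv rest ih =>
    have hrest : (rest.map Prod.fst).Nodup := (List.nodup_cons.1 hp).2
    rw [PySem.Dict.get?_mk_cons]
    by_cases h : kv.1 = u
    · have hnotin : kv.1 ∉ rest.map Prod.fst := (List.nodup_cons.1 hp).1
      have hfil : rest.filter (fun q => q.1 == u) = [] := by
        rw [List.filter_eq_nil_iff]
        intro q hq
        simp only [beq_iff_eq]
        intro hqu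
        exact hnotin (h ▸ hqu ▸ List.mem_map_of_mem hq)
      simp [List.filter_cons, h, hfil]
      exact Prod.ext h rfl
    · have hb : (kv.1 == u) = false := beq_eq_false_iff_ne.2 h
      simp only [List.filter_cons, hb, Bool.false_eq_true, if_false]
      simpa [hb] using ih hrest

theorem pvScanR_cons (a : Int × Int) (X : List (Int × Int)) :
    pvScanR (a :: X) = (X.head?.elim 0 (fun b => if b.1 = a.1 + 1 ∧ a.2 ≠ b.2 then 1 else 0)) + pvScanR X := by
  cases X with
  | nil => simp [pvScanR]
  | cons b rest => simp [pvScanR]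

theorem pvScan_fold (tl : List (Int × Int)) (c : Int) :
    (tl.zip (tl.drop 1)).foldl
      (fun c pq => if pq.2.1 = pq.1.1 + 1 ∧ pq.1.2 ≠ pq.2.2 then c + 1 else c) c
    = c + pvScanR tl := by
  induction tl generalizing c with
  | nil => simp [pvScanR]
  | cons a tl ih =>
    cases tl with
    | nil => simp [pvScanR]
    | cons b rest =>
      simp only [List.drop_succ_cons, List.drop_zero, List.zip_cons_cons, List.foldl_cons]
      have := ih (c := if b.1 = a.1 + 1 ∧ a.2 ≠ b.2 then c + 1 else c)
      simp only [List.drop_succ_cons, List.drop_zero] at this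
      rw [this]
      simp only [pvScanR]
      split <;> ring

-- ---- per-uav splitting of one record off the timeline ----
theorem pvScan_split (u : String) (p c : List (String × Int))
    (hp : (p.map Prod.fst).Nodup) (hc : (c.map Prod.fst).Nodup) (i : Int)
    (tl' : List (Int × Int)) (htl : ∀ e ∈ tl', i + 1 ≤ e.1) :
    pvScanR ((p.filter (fun q => q.1 == u)).map (fun q => (i-1, q.2))
             ++ ((c.filter (fun q => q.1 == u)).map (fun q => (i, q.2)) ++ tl'))
    = pvG p c u + pvScanR ((c.filter (fun q => q.1 == u)).map (fun q => (i, q.2)) ++ tl') := by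
  rw [pvFilter_eq p u hp, pvFilter_eq c u hc]
  cases hpu : (PySem.Dict.mk p).get? u with
  | none => simp [pvG, hpu]
  | some vp =>
    simp only [List.map_cons, List.map_nil, List.cons_append, List.nil_append]
    rw [pvScanR_cons]
    congr 1
    cases hcu : (PySem.Dict.mk c).get? u with
    | some v =>
      simp only [List.map_cons, List.map_nil, List.cons_append, List.head?_cons, Option.elim_some]
      have : i = i - 1 + 1 := by omega
      simp [pvG, hpu, hcu, ← this]
    | none =>
      simp only [List.map_nil, List.nil_append]
      cases tl' with
      | nil => simp [pvG, hpu, hcu]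
      | cons b rest =>
        have hb : i + 1 ≤ b.1 := htl b (by simp)
        simp [pvG, hpu, hcu]
        exact fun h => absurd h (by omega)

theorem pvChg_eq_sum (p c : List (String × Int)) :
    pvChg p c = (c.map (fun q => match (PySem.Dict.mk p).get? q.1 with
      | some v => if v ≠ q.2 then (1:Int) else 0
      | none => 0)).sum := by
  have aux : ∀ (c : List (String × Int)) (a : Int),
      c.foldl (fun acc q => match (PySem.Dict.mk p).get? q.1 with
        | some v => if v ≠ q.2 then acc + 1 else acc
        | none => acc) a
      = a + (c.map (fun q => match (PySem.Dict.mk p).get? q.1 with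
        | some v => if v ≠ q.2 then (1:Int) else 0
        | none => 0)).sum := by
    intro c
    induction c with
    | nil => intro a; simp
    | cons q rest ih =>
      intro a
      simp only [List.foldl_cons, List.map_cons, List.sum_cons]
      cases hpu : (PySem.Dict.mk p).get? q.1 with
      | none => simp only [hpu]; rw [ih]; simp
      | some v => simp only [hpu]; rw [ih]; split <;> ring
  simpa [pvChg] using aux c 0

theorem pvSum_G (p c : List (String × Int)) (hc : (c.map Prod.fst).Nodup)
    (S : Finset String) (hS : ∀ u ∈ (c.map Prod.fst), u ∈ S) :
    (∑ u ∈ S, pvG p c u) = pvChg p c := by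
  have hT : (c.map Prod.fst).toFinset ⊆ S := by
    intro u hu
    exact hS u (List.mem_toFinset.1 hu)
  have hz : ∀ u ∈ S, u ∉ (c.map Prod.fst).toFinset → pvG p c u = 0 := by
    intro u _ hu
    have hn : (PySem.Dict.mk c).get? u = none := by
      rw [PySem.Dict.get?_eq_none_iff_not_mem_keys]
      simpa [PySem.Dict.keys, PySem.Dict.items] using fun h => hu (List.mem_toFinset.2 h)
    cases hpu : (PySem.Dict.mk p).get? u <;> simp [pvG, hpu, hn]
  rw [← Finset.sum_subset hT hz, List.sum_toFinset _ hc, List.map_map, pvChg_eq_sum]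
  apply congrArg List.sum
  apply List.map_congr_left
  intro q hq
  have hcq : (PySem.Dict.mk c).get? q.1 = some q.2 := by
    apply PySem.Dict.get?_of_mem_items
    · simpa [PySem.Dict.items] using hq
    · simpa [PySem.Dict.keys, PySem.Dict.items] using hc
  cases hpu : (PySem.Dict.mk p).get? q.1 <;> simp [pvG, Function.comp, hpu, hcq]

-- ---- the main induction: sum of timeline scans = A's recursion ----
theorem pvMain (key : String) (l : List (List (String × List (String × Int))))
    (h : ∀ r ∈ l, ((pvCur key r).map Prod.fst).Nodup) (i : Int)
    (p : List (String × Int)) (hp : (p.map Prod.fst).Nodup) :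
    (∑ u ∈ ((p.map Prod.fst) ++ pvKeys key l).toFinset,
       pvScanR ((p.filter (fun q => q.1 == u)).map (fun q => (i-1, q.2)) ++ pvTl key u i l))
    = pvASum key p l := by
  induction l generalizing i p with
  | nil =>
    simp only [pvASum]
    apply Finset.sum_eq_zero
    intro u _
    have htl : pvTl key u i [] = [] := by simp [pvTl, pvOcc]
    rw [htl, pvFilter_eq p u hp]
    cases hpu : (PySem.Dict.mk p).get? u <;> simp [pvScanR]
  | cons r rest ih =>
    have hc : ((pvCur key r).map Prod.fst).Nodup := h r (List.mem_cons_self ..)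
    have hrest : ∀ r' ∈ rest, ((pvCur key r').map Prod.fst).Nodup :=
      fun r' hr' => h r' (List.mem_cons_of_mem _ hr')
    have hkeys : pvKeys key (r :: rest) = (pvCur key r).map Prod.fst ++ pvKeys key rest := by
      simp [pvKeys]
    have hsplit : ∀ u,
        pvScanR ((p.filter (fun q => q.1 == u)).map (fun q => (i-1, q.2)) ++ pvTl key u i (r :: rest))
        = pvG p (pvCur key r) u
          + pvScanR (((pvCur key r).filter (fun q => q.1 == u)).map (fun q => (i, q.2))
              ++ pvTl key u (i+1) rest) := by
      intro u
      rw [pvTl_cons]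
      exact pvScan_split u p (pvCur key r) hp hc i _ (pvTl_ge key u (i+1) rest)
    rw [Finset.sum_congr rfl (fun u _ => hsplit u), Finset.sum_add_distrib]
    have hS1 : (∑ u ∈ ((p.map Prod.fst) ++ pvKeys key (r :: rest)).toFinset, pvG p (pvCur key r) u)
        = pvChg p (pvCur key r) := by
      apply pvSum_G _ _ hc
      intro u hu
      rw [List.mem_toFinset, List.mem_append, hkeys, List.mem_append]
      exact Or.inr (Or.inl hu)
    have hsub : (((pvCur key r).map Prod.fst) ++ pvKeys key rest).toFinset
        ⊆ ((p.map Prod.fst) ++ pvKeys key (r :: rest)).toFinset := by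
      intro u hu
      rw [List.mem_toFinset, List.mem_append] at hu
      rw [List.mem_toFinset, List.mem_append, hkeys, List.mem_append]
      exact Or.inr hu
    have hzero : ∀ u ∈ ((p.map Prod.fst) ++ pvKeys key (r :: rest)).toFinset,
        u ∉ (((pvCur key r).map Prod.fst) ++ pvKeys key rest).toFinset →
        pvScanR (((pvCur key r).filter (fun q => q.1 == u)).map (fun q => (i, q.2))
              ++ pvTl key u (i+1) rest) = 0 := by
      intro u _ hu
      rw [List.mem_toFinset, List.mem_append] at hu
      push_neg at hu
      have hfil : (pvCur key r).filter (fun q => q.1 == u) = [] := by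
        rw [List.filter_eq_nil_iff]
        intro q hq
        simp only [beq_iff_eq]
        intro hqu
        exact hu.1 (hqu ▸ List.mem_map_of_mem hq)
      rw [hfil, pvTl_nil_of_not_mem key u (i+1) rest hu.2]
      rfl
    have hS2 : (∑ u ∈ ((p.map Prod.fst) ++ pvKeys key (r :: rest)).toFinset,
          pvScanR (((pvCur key r).filter (fun q => q.1 == u)).map (fun q => (i, q.2))
              ++ pvTl key u (i+1) rest))
        = pvASum key (pvCur key r) rest := by
      rw [← Finset.sum_subset hsub hzero]
      have := ih hrest (i+1) (pvCur key r) hc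
      simp only [add_sub_cancel_right] at this
      exact this
    rw [hS1, hS2]
    rfl

-- ---- B equals the Finset sum ----
theorem pvB_sum (key : String) (l : List (List (String × List (String × Int)))) :
    count_record_changes_alt l key
      = ∑ u ∈ (pvKeys key l).toFinset, pvScanR (pvTl key u 0 l) := by
  have hflat := pvBuild_flat key l 0 PySem.Dict.empty
  set D := (pvOcc key 0 l).foldl (fun d r => d.modify r.1 [] (fun tl => tl ++ [r.2])) PySem.Dict.empty with hD
  have hgetD : ∀ u, D.getD u [] = pvTl key u 0 l := by
    intro u
    rw [hD, PySem.Dict.getD_foldl_modify_append, PySem.Dict.getD_empty]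
    rfl
  have hkeys : D.keys = PySem.Set.ofList (pvKeys key l) := by
    rw [hD, PySem.Dict.keys_foldl_modify_key (pvOcc key 0 l) Prod.fst [] (fun _ x tl => tl ++ [x.2])
          PySem.Dict.empty, PySem.Dict.keys_empty, PySem.Set.update_nil_left, pvOcc_map_fst]
  have hnody : D.keys.Nodup := by rw [hkeys]; exact PySem.Set.nodup_ofList _
  have hvals : D.values = D.keys.map (fun k => D.getD k []) := PySem.Dict.values_eq_map_keys D hnody []
  have houter : ∀ (L : List (List (Int × Int))) (c : Int),
      L.foldl (fun c tl => (tl.zip (tl.drop 1)).foldl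
        (fun c pq => if pq.2.1 = pq.1.1 + 1 ∧ pq.1.2 ≠ pq.2.2 then c + 1 else c) c) c
      = c + (L.map pvScanR).sum := by
    intro L
    induction L with
    | nil => intro c; simp
    | cons tl L ih =>
      intro c
      simp only [List.foldl_cons, List.map_cons, List.sum_cons]
      rw [pvScan_fold, ih]
      ring
  have halt : count_record_changes_alt l key
      = ((PySem.List.enumerate l 0).foldl
          (fun d p => ((PySem.Dict.mk p.2).getD key []).foldl
              (fun d q => d.modify q.1 [] (fun tl => tl ++ [(p.1, q.2)])) d)
          PySem.Dict.empty).values.foldl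
        (fun c tl => (tl.zip (tl.drop 1)).foldl
            (fun c pq => if pq.2.1 = pq.1.1 + 1 ∧ pq.1.2 ≠ pq.2.2 then c + 1 else c) c) 0 := rfl
  rw [halt, hflat, houter, zero_add, hvals, List.map_map]
  have hmapeq : D.keys.map (pvScanR ∘ fun k => D.getD k [])
      = D.keys.map (fun u => pvScanR (pvTl key u 0 l)) := by
    apply List.map_congr_left
    intro u _
    simp [Function.comp, hgetD u]
  rw [hmapeq, hkeys]
  have hnod : (PySem.Set.ofList (pvKeys key l)).Nodup := PySem.Set.nodup_ofList _
  rw [← List.sum_toFinset _ hnod]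
  have htf : (PySem.Set.ofList (pvKeys key l) : List String).toFinset = (pvKeys key l).toFinset := by
    apply Finset.ext
    intro u
    simp only [List.mem_toFinset]
    exact PySem.Set.mem_ofList _ _
  rw [htf]

-- ===== VERDICT (by name: the statement is the Claim_ definition above) =====
theorem count_record_changes_spec : Claim_equal_count_record_changes := by
  intro records key _ hpre
  unfold Spec_count_record_changes
  have hnod : ∀ r ∈ records, ((pvCur key r).map Prod.fst).Nodup := by
    intro r hr
    unfold pvCur
    rw [PySem.Dict.getD_eq_get?_getD]
    cases hg : (PySem.Dict.mk r).get? key with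
    | none => simp
    | some v =>
      have hmem : (key, v) ∈ r := by
        simpa [PySem.Dict.items] using PySem.Dict.mem_items_of_get?_eq_some _ hg
      simpa using hpre r hr (key, v) hmem
  have hA : count_record_changes records key = pvASum key [] records := by
    unfold count_record_changes
    have : (PySem.Dict.empty : PySem.Dict String Int) = PySem.Dict.mk [] := rfl
    rw [this, pvA_loop, zero_add]
  have hB := pvB_sum key records
  have hmain := pvMain key records hnod 0 [] (by simp)
  simp only [List.map_nil, List.filter_nil, List.nil_append] at hmain
  rw [hA, hB, ← hmain]
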